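-- pv_equiv track=rewrite | github.com/atiilla/sqlmap-ai | sqlmap_ai/runner.py | _parse_multiline_headers
-- ===== SOURCE A (Python) =====
-- from typing import List, Dict, Any, Optional, Union
--
-- def _parse_multiline_headers(lines: List[str]) -> Dict[str, str]:
--
--     headers = {}
--     current_header = None
--     current_value = ""
--
--     for line in lines:
--         # Check for continuation line (starts with whitespace)
--         if line.startswith((' ', '\t')) and current_header:
--             # Continuation of previous header
--             current_value += " " + line.strip()
--         elif ':' in line:
--             # Save previous header if exists
--             if current_header:
--                 headers[current_header.lower()] = current_value.strip()
--
--             # Start new header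
--             header_parts = line.split(':', 1)
--             current_header = header_parts[0].strip()
--             current_value = header_parts[1].strip() if len(header_parts) > 1 else ""
--
--     # Save the last header
--     if current_header:
--         headers[current_header.lower()] = current_value.strip()
--
--     return headers
-- ===== SOURCE B (Python) =====
-- from typing import List, Dict
--
--
-- def _parse_multiline_headers(lines: List[str]) -> Dict[str, str]:
--     # Pass 1: group the lines into logical header records
--     # (first-line key, first-line value, continuation fragments).
--     records = []
--     current = None
--     for line in lines:
--         if line.startswith((' ', '\t')) and current is not None:
--             current[2].append(line.strip())
--         elif ':' in line:
--             if current is not None: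
--                 records.append(current)
--             parts = line.split(':', 1)
--             key = parts[0].strip()
--             value = parts[1].strip() if len(parts) > 1 else ""
--             current = [key, value, []] if key else None
--     if current is not None:
--         records.append(current)
--
--     # Pass 2: render each record into the dict (later duplicates overwrite).
--     headers = {}
--     for key, value, frags in records:
--         headers[key.lower()] = " ".join([value] + frags).strip()
--     return headers
-- ===== Notes on version B (the rewrite author's own statement) =====
-- stated objective: alternative
-- what changed: A interleaves parsing and dict accumulation in one fold over mutable current_header/current_value strings; B is a two-pass decomposition: first group lines into logical header records (key, first value, continuation fragments), then render each record into the dict with a single space-join.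
import Mathlib
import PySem

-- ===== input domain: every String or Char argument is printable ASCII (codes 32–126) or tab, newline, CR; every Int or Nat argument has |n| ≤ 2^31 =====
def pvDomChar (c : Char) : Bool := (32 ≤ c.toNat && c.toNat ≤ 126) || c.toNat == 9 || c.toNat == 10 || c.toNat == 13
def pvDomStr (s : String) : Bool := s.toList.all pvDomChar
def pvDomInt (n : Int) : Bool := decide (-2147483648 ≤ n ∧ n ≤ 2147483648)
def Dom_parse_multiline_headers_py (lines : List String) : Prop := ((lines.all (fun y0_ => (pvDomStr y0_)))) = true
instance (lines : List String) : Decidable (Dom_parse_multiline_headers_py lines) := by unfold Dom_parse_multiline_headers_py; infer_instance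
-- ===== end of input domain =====

-- ===== PORT A =====
-- B re-implements A as a two-pass record grouping; return-value equivalence proved below.
-- A's loop state: (headers, current_header, current_value).  Python's current_header starts as
-- None and is only read through truthiness and as a string, so None is represented by "".
def pmhAStep (st : PySem.Dict String String × String × String) (line : String) :
    PySem.Dict String String × String × String :=
  if (PySem.Str.startswith line " " || PySem.Str.startswith line "\t") && st.2.1 != "" then
    (st.1, st.2.1, st.2.2 ++ " " ++ PySem.Str.strip line)
  else if PySem.Str.isIn ":" line then
    let headers := if st.2.1 != "" then st.1.insert (PySem.Str.lower st.2.1) (PySem.Str.strip st.2.2) else st.1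
    let parts := (PySem.Str.splitMax? line ":" 1).getD []   -- ':' ≠ "", so never none
    (headers, PySem.Str.strip (PySem.List.pyGetD parts 0 ""),
      if PySem.List.len parts > 1 then PySem.Str.strip (PySem.List.pyGetD parts 1 "") else "")
  else st

-- trailing "save the last header"
def pmhFinalA (st : PySem.Dict String String × String × String) : PySem.Dict String String :=
  if st.2.1 != "" then st.1.insert (PySem.Str.lower st.2.1) (PySem.Str.strip st.2.2) else st.1

def parse_multiline_headers_py (lines : List String) : List (String × String) :=
  (pmhFinalA (lines.foldl pmhAStep (PySem.Dict.empty, "", ""))).items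

-- ===== PORT B =====
-- B's pass-1 state: (finished records, active record); a record is (key, first value, fragments).
def pmhBStep (st : List (String × String × List String) × Option (String × String × List String))
    (line : String) :
    List (String × String × List String) × Option (String × String × List String) :=
  if (PySem.Str.startswith line " " || PySem.Str.startswith line "\t") && st.2.isSome then
    (st.1, st.2.map (fun r => (r.1, r.2.1, r.2.2 ++ [PySem.Str.strip line])))
  else if PySem.Str.isIn ":" line then
    let recs := st.1 ++ st.2.toList
    let parts := (PySem.Str.splitMax? line ":" 1).getD []   -- ':' ≠ "", so never none
    let key := PySem.Str.strip (PySem.List.pyGetD parts 0 "")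
    let value := if PySem.List.len parts > 1 then PySem.Str.strip (PySem.List.pyGetD parts 1 "") else ""
    (recs, if key != "" then some (key, value, []) else none)
  else st

-- B's pass 2: render the records into the dict
def pmhRender (recs : List (String × String × List String)) : PySem.Dict String String :=
  recs.foldl
    (fun d r => d.insert (PySem.Str.lower r.1) (PySem.Str.strip (PySem.Str.join " " (r.2.1 :: r.2.2))))
    PySem.Dict.empty

def parse_multiline_headers_py_alt (lines : List String) : List (String × String) :=
  let st := lines.foldl pmhBStep ([], none)
  (pmhRender (st.1 ++ st.2.toList)).items

-- ===== PRECONDITION & SPEC =====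
def Spec_parse_multiline_headers_py (lines : List String) (out : List (String × String)) : Prop := out = parse_multiline_headers_py_alt lines
instance (lines : List String) (out : List (String × String)) : Decidable (Spec_parse_multiline_headers_py lines out) := by unfold Spec_parse_multiline_headers_py; infer_instance

-- ===== CLAIM (what is proved, stated in full; the proofs are below) =====
def Claim_equal_parse_multiline_headers_py : Prop := ∀ (lines : List String), Dom_parse_multiline_headers_py lines → Spec_parse_multiline_headers_py lines (parse_multiline_headers_py lines)

-- ===== LEMMAS AND PROOFS =====

-- key/value computed by both ports' ':'-branches (proof-side abbreviations)
def pmhKey (line : String) : String :=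
  PySem.Str.strip (PySem.List.pyGetD ((PySem.Str.splitMax? line ":" 1).getD []) 0 "")

def pmhVal (line : String) : String :=
  if PySem.List.len ((PySem.Str.splitMax? line ":" 1).getD []) > 1 then
    PySem.Str.strip (PySem.List.pyGetD ((PySem.Str.splitMax? line ":" 1).getD []) 1 "")
  else ""

def pmhCur (line : String) : Option (String × String × List String) :=
  if pmhKey line != "" then some (pmhKey line, pmhVal line, []) else none

-- A's accumulated current_value as a function of B's record fields
def pmhAcc (v : String) (fr : List String) : String :=
  fr.foldl (fun a f => a ++ " " ++ f) v

-- the relation between A's (current_header, current_value) and B's active record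
def pmhInv (ch cv : String) (cur : Option (String × String × List String)) : Prop :=
  (ch = "" ∧ cur = none) ∨
  (∃ v fr, cur = some (ch, v, fr) ∧ ch ≠ "" ∧ cv = pmhAcc v fr)

lemma pmhAcc_prepend (fr : List String) (p v : String) :
    pmhAcc (p ++ v) fr = p ++ pmhAcc v fr := by
  induction fr generalizing v with
  | nil => rfl
  | cons f fr ih =>
      show pmhAcc (p ++ v ++ " " ++ f) fr = p ++ pmhAcc (v ++ " " ++ f) fr
      have e : p ++ v ++ " " ++ f = p ++ (v ++ " " ++ f) := by
        simp [String.append_assoc]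
      rw [e, ih]

lemma pmhStrJoin_cons_cons (sep a b : String) (rest : List String) :
    PySem.Str.join sep (a :: b :: rest) = a ++ sep ++ PySem.Str.join sep (b :: rest) := by
  simp [PySem.Str.join, PySem.Chars.join_cons_cons, String.append_assoc]

lemma pmhJoin_eq_acc (fr : List String) (v : String) :
    PySem.Str.join " " (v :: fr) = pmhAcc v fr := by
  induction fr generalizing v with
  | nil => simp [PySem.Str.join, PySem.Chars.join_singleton, pmhAcc]
  | cons f fr ih =>
      rw [pmhStrJoin_cons_cons, ih]
      show v ++ " " ++ pmhAcc f fr = pmhAcc (v ++ " " ++ f) fr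
      rw [pmhAcc_prepend fr (v ++ " ") f]

lemma pmhRender_append_one (recs : List (String × String × List String)) (r : String × String × List String) :
    pmhRender (recs ++ [r]) =
      (pmhRender recs).insert (PySem.Str.lower r.1) (PySem.Str.strip (PySem.Str.join " " (r.2.1 :: r.2.2))) := by
  simp [pmhRender, List.foldl_append]

lemma pmhInv_new (line : String) : pmhInv (pmhKey line) (pmhVal line) (pmhCur line) := by
  by_cases hk : pmhKey line = ""
  · exact Or.inl ⟨hk, by simp [pmhCur, hk]⟩
  · exact Or.inr ⟨pmhVal line, [], by simp [pmhCur, hk], hk, rfl⟩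

-- main loop correspondence
lemma pmhLoop (lines : List String) :
    ∀ (h : PySem.Dict String String) (recs : List (String × String × List String))
      (ch cv : String) (cur : Option (String × String × List String)),
      pmhInv ch cv cur → h = pmhRender recs →
      pmhFinalA (lines.foldl pmhAStep (h, ch, cv)) =
        pmhRender ((lines.foldl pmhBStep (recs, cur)).1 ++ (lines.foldl pmhBStep (recs, cur)).2.toList) := by
  induction lines with
  | nil =>
      intro h recs ch cv cur hinv hh
      rcases hinv with ⟨hch, hcur⟩ | ⟨v, fr, hcur, hch, hcv⟩
      · subst hch hcur hh
        simp [pmhFinalA, Option.toList]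
      · subst hcur hcv hh
        simp only [List.foldl_nil, Option.toList_some, pmhFinalA, pmhRender_append_one,
          pmhJoin_eq_acc]
        rw [if_pos (by simpa using hch)]
  | cons line rest ih =>
      intro h recs ch cv cur hinv hh
      simp only [List.foldl_cons]
      rcases hinv with ⟨hch, hcur⟩ | ⟨v, fr, hcur, hch, hcv⟩
      · -- no active header/record: the continuation branch cannot fire on either side
        subst hch hcur
        cases e3 : PySem.Chars.isIn [':'] line.toList with
        | true =>
            have hA : pmhAStep (h, "", cv) line = (h, pmhKey line, pmhVal line) := by
              simp [pmhAStep, e3, pmhKey, pmhVal]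
            have hB : pmhBStep (recs, none) line = (recs, pmhCur line) := by
              simp [pmhBStep, e3, pmhCur, pmhKey, pmhVal]
            rw [hA, hB]
            exact ih h recs _ _ _ (pmhInv_new line) hh
        | false =>
            have hA : pmhAStep (h, "", cv) line = (h, "", cv) := by
              simp [pmhAStep, e3]
            have hB : pmhBStep (recs, none) line = (recs, none) := by
              simp [pmhBStep, e3]
            rw [hA, hB]
            exact ih h recs _ _ _ (Or.inl ⟨rfl, rfl⟩) hh
      · -- active header ch = active record (ch, v, fr)
        subst hcur hcv
        have hcont : ∀ (hsw : PySem.Chars.startswith line.toList [' '] = true ∨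
              PySem.Chars.startswith line.toList ['\t'] = true),
            pmhFinalA (List.foldl pmhAStep (pmhAStep (h, ch, pmhAcc v fr) line) rest) =
              pmhRender ((List.foldl pmhBStep (pmhBStep (recs, some (ch, v, fr)) line) rest).1 ++
                (List.foldl pmhBStep (pmhBStep (recs, some (ch, v, fr)) line) rest).2.toList) := by
          intro hsw
          have hA : pmhAStep (h, ch, pmhAcc v fr) line =
              (h, ch, pmhAcc v fr ++ " " ++ PySem.Str.strip line) := by
            rcases hsw with e | e <;> simp [pmhAStep, e, hch]
          have hB : pmhBStep (recs, some (ch, v, fr)) line =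
              (recs, some (ch, v, fr ++ [PySem.Str.strip line])) := by
            rcases hsw with e | e <;> simp [pmhBStep, e]
          rw [hA, hB]
          refine ih h recs ch _ _ ?_ hh
          exact Or.inr ⟨v, fr ++ [PySem.Str.strip line], rfl, hch, by
            simp [pmhAcc, List.foldl_append]⟩
        cases e1 : PySem.Chars.startswith line.toList [' '] with
        | true => exact hcont (Or.inl e1)
        | false =>
        cases e2 : PySem.Chars.startswith line.toList ['\t'] with
        | true => exact hcont (Or.inr e2)
        | false =>
        cases e3 : PySem.Chars.isIn [':'] line.toList with
        | true =>
            -- new header: A saves into the dict, B flushes the record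
            have hA : pmhAStep (h, ch, pmhAcc v fr) line =
                (h.insert (PySem.Str.lower ch) (PySem.Str.strip (pmhAcc v fr)),
                  pmhKey line, pmhVal line) := by
              simp [pmhAStep, e1, e2, e3, hch, pmhKey, pmhVal]
            have hB : pmhBStep (recs, some (ch, v, fr)) line =
                (recs ++ [(ch, v, fr)], pmhCur line) := by
              simp [pmhBStep, e1, e2, e3, pmhCur, pmhKey, pmhVal]
            have hren : h.insert (PySem.Str.lower ch) (PySem.Str.strip (pmhAcc v fr)) =
                pmhRender (recs ++ [(ch, v, fr)]) := by
              rw [hh, pmhRender_append_one, pmhJoin_eq_acc]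
            rw [hA, hB]
            exact ih _ _ _ _ _ (pmhInv_new line) hren
        | false =>
            -- dropped line
            have hA : pmhAStep (h, ch, pmhAcc v fr) line = (h, ch, pmhAcc v fr) := by
              simp [pmhAStep, e1, e2, e3]
            have hB : pmhBStep (recs, some (ch, v, fr)) line = (recs, some (ch, v, fr)) := by
              simp [pmhBStep, e1, e2, e3]
            rw [hA, hB]
            exact ih h recs ch _ _ (Or.inr ⟨v, fr, rfl, hch, rfl⟩) hh

-- ===== VERDICT (by name: the statement is the Claim_ definition above) =====
theorem parse_multiline_headers_py_spec : Claim_equal_parse_multiline_headers_py := by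
  intro lines _
  show parse_multiline_headers_py lines = parse_multiline_headers_py_alt lines
  unfold parse_multiline_headers_py parse_multiline_headers_py_alt
  exact congrArg PySem.Dict.items
    (pmhLoop lines PySem.Dict.empty [] "" "" none (Or.inl ⟨rfl, rfl⟩) rfl)
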